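-- pv_equiv track=rewrite | github.com/msrosenberg/ImpactFactor | ImpactFactorCalculator.py | calculate_two_sided_h
-- ===== SOURCE A (Python) =====
-- def calculate_two_sided_h(h: int, multi_dim_h: list, n: int, rankorder: list, cites: list) -> list:
--     # only need to calculate the upper part of the index
--     # the center and tail are indentical to multidimensional h
--     # auto-calculate for as many steps in core as equal to length of
--     # steps in tail
--     twosidedh = []
--     for i in multi_dim_h:
--         twosidedh.append(i)
--     j = 0
--     tmph = h
--     k = 1
--     while k < len(multi_dim_h):
--         j = j + tmph
--         tmph = 0
--         for i in range(n):
--             if rankorder[i] <= cites[i] - j: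
--                 tmph += 1
--         twosidedh.insert(0, tmph)
--         k += 1
--     return twosidedh
-- ===== SOURCE B (Python) =====
-- def calculate_two_sided_h(h: int, multi_dim_h: list, n: int, rankorder: list, cites: list) -> list:
--     # Faster: sort the differences cites[i]-rankorder[i] once, then each core step
--     # counts entries >= j with a hand-written bisect_left (binary search).
--     steps = len(multi_dim_h) - 1
--     core = []
--     if steps > 0:
--         ds = sorted(cites[i] - rankorder[i] for i in range(n))
--         m = len(ds)
--         j = 0
--         tmph = h
--         for _ in range(steps):
--             j += tmph
--             # bisect_left(ds, j): first index whose value is >= j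
--             lo, hi = 0, m
--             while lo < hi:
--                 mid = (lo + hi) // 2
--                 if ds[mid] < j:
--                     lo = mid + 1
--                 else:
--                     hi = mid
--             tmph = m - lo
--             core.append(tmph)
--         core.reverse()
--     return core + list(multi_dim_h)
-- ===== Notes on version B (the rewrite author's own statement) =====
-- stated objective: faster
-- what changed: B precomputes and sorts the differences cites[i]-rankorder[i] once, then answers each core step with a binary search (bisect_left) for the first difference >= j, building the core list by append+reverse instead of repeated insert(0,.); A rescans all n papers (and pays insert(0)'s shift) on every step.
import Mathlib
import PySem

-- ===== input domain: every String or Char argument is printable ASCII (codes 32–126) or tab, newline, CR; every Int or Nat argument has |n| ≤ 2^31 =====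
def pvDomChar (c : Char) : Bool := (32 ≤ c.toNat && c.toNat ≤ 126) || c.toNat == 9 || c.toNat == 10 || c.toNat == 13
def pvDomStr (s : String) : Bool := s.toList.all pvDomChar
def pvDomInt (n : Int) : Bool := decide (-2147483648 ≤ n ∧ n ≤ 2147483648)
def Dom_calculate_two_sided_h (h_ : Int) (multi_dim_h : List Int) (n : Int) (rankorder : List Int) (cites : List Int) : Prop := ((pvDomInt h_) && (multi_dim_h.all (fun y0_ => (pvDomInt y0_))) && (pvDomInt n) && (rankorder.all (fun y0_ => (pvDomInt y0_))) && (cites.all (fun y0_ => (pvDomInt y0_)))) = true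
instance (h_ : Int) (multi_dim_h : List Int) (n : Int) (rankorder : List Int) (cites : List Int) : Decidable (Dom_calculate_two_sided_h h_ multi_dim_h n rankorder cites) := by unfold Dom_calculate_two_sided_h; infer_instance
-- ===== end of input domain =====

-- B sorts the differences cites[i]-rankorder[i] once and answers each core step by a
-- binary search (bisect_left) instead of A's per-step scan over all n papers.

-- ===== PORT A =====
def calculate_two_sided_h (h_ : Int) (multi_dim_h : List Int) (n : Int) (rankorder : List Int) (cites : List Int) : List Int :=
  let twosidedh := multi_dim_h.foldl (fun acc i => acc ++ [i]) []
  -- while k < len(multi_dim_h): runs len(multi_dim_h) - 1 times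
  let st := (List.range (multi_dim_h.length - 1)).foldl
    (fun (st : Int × Int × List Int) _ =>
      let j := st.1 + st.2.1
      let tmph := (PySem.List.pyRange 0 n 1).foldl
        (fun t i => if (PySem.List.pyGet? rankorder i).getD 0 ≤ (PySem.List.pyGet? cites i).getD 0 - j then t + 1 else t)
        (0 : Int)
      (j, tmph, tmph :: st.2.2))
    (0, h_, twosidedh)
  st.2.2

-- ===== PORT B =====
-- B's hand-written lo/hi loop (mid = (lo+hi)//2; ds[mid] < j → lo = mid+1 else hi = mid,
-- started at lo = 0, hi = len(ds)) is step for step the bisect_left algorithm, i.e.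
-- exactly PySem.List.bisectLeft.
def calculate_two_sided_h_alt (h_ : Int) (multi_dim_h : List Int) (n : Int) (rankorder : List Int) (cites : List Int) : List Int :=
  let steps := multi_dim_h.length - 1
  let core :=
    if 0 < steps then
      let ds := PySem.List.sorted ((PySem.List.pyRange 0 n 1).map
        (fun i => (PySem.List.pyGet? cites i).getD 0 - (PySem.List.pyGet? rankorder i).getD 0)) (fun x => x) false
      let m := ds.length
      let st := (List.range steps).foldl
        (fun (st : Int × Int × List Int) _ =>
          let j := st.1 + st.2.1
          let lo := PySem.List.bisectLeft ds j
          let tmph := (m : Int) - (lo : Int)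
          (j, tmph, st.2.2 ++ [tmph]))
        (0, h_, [])
      st.2.2.reverse
    else []
  core ++ multi_dim_h

-- ===== PRECONDITION & SPEC =====
-- Pre_ excludes exactly the inputs on which A raises IndexError: the core loop runs
-- (len(multi_dim_h) ≥ 2) and n exceeds the length of rankorder or cites.
def Pre_calculate_two_sided_h (h_ : Int) (multi_dim_h : List Int) (n : Int) (rankorder : List Int) (cites : List Int) : Prop :=
  multi_dim_h.length ≤ 1 ∨ (n ≤ (rankorder.length : Int) ∧ n ≤ (cites.length : Int))
instance (h_ : Int) (multi_dim_h : List Int) (n : Int) (rankorder : List Int) (cites : List Int) : Decidable (Pre_calculate_two_sided_h h_ multi_dim_h n rankorder cites) := by unfold Pre_calculate_two_sided_h; infer_instance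
def pvWitness_calculate_two_sided_h : Int × List Int × Int × List Int × List Int := (2, [2, 1], 4, [1, 2, 3, 4], [5, 4, 2, 1])
def Spec_calculate_two_sided_h (h_ : Int) (multi_dim_h : List Int) (n : Int) (rankorder : List Int) (cites : List Int) (out : List Int) : Prop := out = calculate_two_sided_h_alt h_ multi_dim_h n rankorder cites
instance (h_ : Int) (multi_dim_h : List Int) (n : Int) (rankorder : List Int) (cites : List Int) (out : List Int) : Decidable (Spec_calculate_two_sided_h h_ multi_dim_h n rankorder cites out) := by unfold Spec_calculate_two_sided_h; infer_instance

-- ===== CLAIM (what is proved, stated in full; the proofs are below) =====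
def Claim_equal_calculate_two_sided_h : Prop := ∀ (h_ : Int) (multi_dim_h : List Int) (n : Int) (rankorder : List Int) (cites : List Int), Dom_calculate_two_sided_h h_ multi_dim_h n rankorder cites → Pre_calculate_two_sided_h h_ multi_dim_h n rankorder cites → Spec_calculate_two_sided_h h_ multi_dim_h n rankorder cites (calculate_two_sided_h h_ multi_dim_h n rankorder cites)

-- ===== LEMMAS AND PROOFS =====

-- the difference list B works on, and its sorted version
def pvDiffs (n : Int) (rankorder cites : List Int) : List Int :=
  (PySem.List.pyRange 0 n 1).map
    (fun i => (PySem.List.pyGet? cites i).getD 0 - (PySem.List.pyGet? rankorder i).getD 0)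
def pvDs (n : Int) (rankorder cites : List Int) : List Int :=
  PySem.List.sorted (pvDiffs n rankorder cites) (fun x => x) false

-- the two loop bodies, as named step functions (definitionally the ports' lambdas)
def pvStepA (n : Int) (rankorder cites : List Int) : (Int × Int × List Int) → ℕ → (Int × Int × List Int) :=
  fun st _ =>
    let j := st.1 + st.2.1
    let tmph := (PySem.List.pyRange 0 n 1).foldl
      (fun t i => if (PySem.List.pyGet? rankorder i).getD 0 ≤ (PySem.List.pyGet? cites i).getD 0 - j then t + 1 else t)
      (0 : Int)
    (j, tmph, tmph :: st.2.2)
def pvStepB (ds : List Int) : (Int × Int × List Int) → ℕ → (Int × Int × List Int) :=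
  fun st _ =>
    let j := st.1 + st.2.1
    let lo := PySem.List.bisectLeft ds j
    let tmph := (ds.length : Int) - (lo : Int)
    (j, tmph, st.2.2 ++ [tmph])

-- A's inner counting loop equals a countP over the difference list
lemma innerA_eq_countP (n : Int) (rankorder cites : List Int) (j : Int) :
    (PySem.List.pyRange 0 n 1).foldl
      (fun t i => if (PySem.List.pyGet? rankorder i).getD 0 ≤ (PySem.List.pyGet? cites i).getD 0 - j then t + 1 else t)
      (0 : Int)
    = ((pvDiffs n rankorder cites).countP (fun x => decide (j ≤ x)) : Int) := by
  have h1 := PySem.List.foldl_count_if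
    (fun i => decide ((PySem.List.pyGet? rankorder i).getD 0 ≤ (PySem.List.pyGet? cites i).getD 0 - j))
    (PySem.List.pyRange 0 n 1) 0
  simp only [decide_eq_true_eq] at h1
  rw [h1, pvDiffs, List.countP_map, zero_add]
  congr 1
  apply List.countP_congr
  intro x hx
  simp only [Function.comp_apply, decide_eq_true_eq]
  omega

-- on a ≤-sorted list, countP (j ≤ ·) = length - bisectLeft
lemma countP_ge_eq_sub_bisectLeft (ds : List Int) (j : Int)
    (hs : ds.Pairwise (fun a b => a ≤ b)) :
    (ds.countP (fun x => decide (j ≤ x)) : Int) = (ds.length : Int) - (PySem.List.bisectLeft ds j : Int) := by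
  obtain ⟨hle, hlt, hge⟩ := PySem.List.bisectLeft_spec ds j hs
  set r := PySem.List.bisectLeft ds j with hr
  have hsplit : ds = ds.take r ++ ds.drop r := (List.take_append_drop r ds).symm
  have h0 : (ds.take r).countP (fun x => decide (j ≤ x)) = 0 := by
    rw [List.countP_eq_zero]
    intro a ha
    rw [List.mem_iff_getElem] at ha
    obtain ⟨i, hi, rfl⟩ := ha
    have hi' : i < r := lt_of_lt_of_le hi (by simp [List.length_take])
    have hil : i < ds.length := lt_of_lt_of_le hi' hle
    have := hlt i hil hi'
    simp [List.getElem_take, this]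
  have h1 : (ds.drop r).countP (fun x => decide (j ≤ x)) = (ds.drop r).length := by
    rw [List.countP_eq_length]
    intro a ha
    rw [List.mem_iff_getElem] at ha
    obtain ⟨i, hi, rfl⟩ := ha
    have hil : r + i < ds.length := by simp [List.length_drop] at hi; omega
    have := hge (r + i) hil (by omega)
    simp [List.getElem_drop]
    omega
  calc (ds.countP (fun x => decide (j ≤ x)) : Int)
      = (((ds.take r ++ ds.drop r).countP (fun x => decide (j ≤ x)) : Nat) : Int) := by rw [← hsplit]
    _ = (ds.length : Int) - (r : Int) := by
        rw [List.countP_append, h0, h1]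
        simp [List.length_drop]
        omega

-- per step, A's scan and B's binary search produce the same count
lemma tmph_eq (n : Int) (rankorder cites : List Int) (j : Int) :
    (PySem.List.pyRange 0 n 1).foldl
      (fun t i => if (PySem.List.pyGet? rankorder i).getD 0 ≤ (PySem.List.pyGet? cites i).getD 0 - j then t + 1 else t)
      (0 : Int)
    = ((pvDs n rankorder cites).length : Int) - (PySem.List.bisectLeft (pvDs n rankorder cites) j : Int) := by
  rw [innerA_eq_countP]
  have hperm : (pvDs n rankorder cites).Perm (pvDiffs n rankorder cites) :=
    PySem.List.sorted_perm _ _ _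
  rw [← hperm.countP_eq]
  apply countP_ge_eq_sub_bisectLeft
  have := PySem.List.sorted_pairwise (pvDiffs n rankorder cites) (fun x => x)
  simpa [pvDs] using this

-- the two loops run in lockstep: same j, same tmph, A prepends what B appends
lemma loop_rel (n : Int) (rankorder cites : List Int) (l : List ℕ) (j t : Int) (LB tail : List Int) :
    l.foldl (pvStepA n rankorder cites) (j, t, LB.reverse ++ tail)
    = ((l.foldl (pvStepB (pvDs n rankorder cites)) (j, t, LB)).1,
       (l.foldl (pvStepB (pvDs n rankorder cites)) (j, t, LB)).2.1,
       (l.foldl (pvStepB (pvDs n rankorder cites)) (j, t, LB)).2.2.reverse ++ tail) := by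
  induction l generalizing j t LB with
  | nil => rfl
  | cons hd tl ih =>
    simp only [List.foldl_cons]
    have hA : pvStepA n rankorder cites (j, t, LB.reverse ++ tail) hd
        = (j + t, ((pvDs n rankorder cites).length : Int) - (PySem.List.bisectLeft (pvDs n rankorder cites) (j + t) : Int),
           (LB ++ [((pvDs n rankorder cites).length : Int) - (PySem.List.bisectLeft (pvDs n rankorder cites) (j + t) : Int)]).reverse ++ tail) := by
      simp [pvStepA, tmph_eq]
    have hB : pvStepB (pvDs n rankorder cites) (j, t, LB) hd
        = (j + t, ((pvDs n rankorder cites).length : Int) - (PySem.List.bisectLeft (pvDs n rankorder cites) (j + t) : Int),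
           LB ++ [((pvDs n rankorder cites).length : Int) - (PySem.List.bisectLeft (pvDs n rankorder cites) (j + t) : Int)]) := by
      simp [pvStepB]
    rw [hA, hB, ih]

-- ===== VERDICT (by name: the statement is the Claim_ definition above) =====
theorem calculate_two_sided_h_spec : Claim_equal_calculate_two_sided_h := by
  intro h_ multi_dim_h n rankorder cites _ _
  unfold Spec_calculate_two_sided_h calculate_two_sided_h calculate_two_sided_h_alt
  simp only [PySem.List.foldl_append_singleton, List.nil_append]
  by_cases hlen : 0 < multi_dim_h.length - 1
  · simp only [if_pos hlen]
    have := loop_rel n rankorder cites (List.range (multi_dim_h.length - 1)) 0 h_ [] multi_dim_h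
    simp only [List.reverse_nil, List.nil_append] at this
    rw [show (List.range (multi_dim_h.length - 1)).foldl
        (fun (st : Int × Int × List Int) _ =>
          let j := st.1 + st.2.1
          let tmph := (PySem.List.pyRange 0 n 1).foldl
            (fun t i => if (PySem.List.pyGet? rankorder i).getD 0 ≤ (PySem.List.pyGet? cites i).getD 0 - j then t + 1 else t)
            (0 : Int)
          (j, tmph, tmph :: st.2.2)) (0, h_, multi_dim_h)
      = (List.range (multi_dim_h.length - 1)).foldl (pvStepA n rankorder cites) (0, h_, multi_dim_h) from rfl]
    rw [this]
    rfl
  · have h0 : multi_dim_h.length - 1 = 0 := by omega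
    simp [h0]
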